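-- pv_equiv track=rewrite | github.com/sinkyoungdeok/ps | programmers/level2/모음사전.py | solution
-- ===== SOURCE A (Python) =====
-- def solution(word):
--     dic = {"E": 1, "I": 2, "O": 3, "U": 4}
--     answer = 0
--
--     for i in range(len(word)):
--         if word[i] == "A":
--             answer += 1
--         else:
--             for j in range(4, i, -1):
--                 answer += (5 ** (j - i)) * dic[word[i]]
--             answer += dic[word[i]] + 1
--
--     return answer
-- ===== SOURCE B (Python) =====
-- def solution(word):
--     weights = [781, 156, 31, 6, 1]
--     dic = {"A": 0, "E": 1, "I": 2, "O": 3, "U": 4}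
--     answer = 0
--     for i, c in enumerate(word):
--         answer += dic[c] * weights[i] + 1
--     return answer
-- ===== Notes on version B (the rewrite author's own statement) =====
-- stated objective: simpler
-- what changed: Replaces A's inner geometric-sum countdown loop with a precomputed 5-entry weight table and a rank for each vowel, so one flat pass computes answer += rank*weight+1 per position.
-- outside the precondition, e.g. on solution('AAAAAA'): A returns 6, B raises IndexError
import Mathlib
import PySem

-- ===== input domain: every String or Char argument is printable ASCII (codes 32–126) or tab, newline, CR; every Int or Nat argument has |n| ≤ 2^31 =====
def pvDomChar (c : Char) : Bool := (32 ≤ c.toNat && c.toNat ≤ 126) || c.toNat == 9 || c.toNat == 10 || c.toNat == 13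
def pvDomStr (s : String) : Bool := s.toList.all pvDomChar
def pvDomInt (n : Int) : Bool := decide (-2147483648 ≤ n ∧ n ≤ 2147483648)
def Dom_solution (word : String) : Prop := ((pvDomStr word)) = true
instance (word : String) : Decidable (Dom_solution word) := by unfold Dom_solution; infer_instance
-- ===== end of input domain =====

-- B replaces A's per-position geometric-sum inner loop by a precomputed weight table: simpler, one flat pass.

-- ===== PORT A =====
-- Python's word[i] is a length-1 string; it is ported as the Char at that index.
-- 5 ** (j - i): inside the loop j > i, so the exponent (j - i).toNat is exact there.
def solDicA : PySem.Dict Char Int :=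
  ((((PySem.Dict.empty).insert 'E' 1).insert 'I' 2).insert 'O' 3).insert 'U' 4

def solution (word : String) : Int :=
  (PySem.List.pyRange 0 (PySem.Str.len word) 1).foldl
    (fun answer i =>
      let c := PySem.List.pyGetD word.toList i ' '
      if c = 'A' then answer + 1
      else
        ((PySem.List.pyRange 4 i (-1)).foldl
          (fun a j => a + (5 : Int) ^ (j - i).toNat * solDicA.getD c 0) answer)
        + solDicA.getD c 0 + 1)
    0

-- ===== PORT B =====
def solWeights : List Int := [781, 156, 31, 6, 1]

def solDicB : PySem.Dict Char Int :=
  (((((PySem.Dict.empty).insert 'A' 0).insert 'E' 1).insert 'I' 2).insert 'O' 3).insert 'U' 4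

def solution_alt (word : String) : Int :=
  (PySem.List.enumerate word.toList 0).foldl
    (fun answer p => answer + solDicB.getD p.2 0 * PySem.List.pyGetD solWeights p.1 0 + 1)
    0

-- ===== PRECONDITION & SPEC =====
-- Pre_ excludes words with a non-vowel character, on which A raises KeyError, and words longer
-- than 5 characters (the problem guarantees len ≤ 5): there A still returns a value but B's
-- natural 5-entry weight table raises IndexError.
def Pre_solution (word : String) : Prop :=
  word.toList.length ≤ 5 ∧ word.toList.all (fun c => decide (c ∈ ['A', 'E', 'I', 'O', 'U'])) = true

instance (word : String) : Decidable (Pre_solution word) := by unfold Pre_solution; infer_instance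

def pvWitness_solution : String := "EIO"

def Spec_solution (word : String) (out : Int) : Prop := out = solution_alt word
instance (word : String) (out : Int) : Decidable (Spec_solution word out) := by unfold Spec_solution; infer_instance

-- ===== CLAIM (what is proved, stated in full; the proofs are below) =====
def Claim_equal_solution : Prop :=
  ∀ (word : String), Dom_solution word → Pre_solution word → Spec_solution word (solution word)

-- ===== LEMMAS AND PROOFS =====

-- evaluated dictionary lookups (closed literals)
theorem dA_E : solDicA.getD 'E' 0 = 1 := by decide
theorem dA_I : solDicA.getD 'I' 0 = 2 := by decide
theorem dA_O : solDicA.getD 'O' 0 = 3 := by decide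
theorem dA_U : solDicA.getD 'U' 0 = 4 := by decide
theorem dB_A : solDicB.getD 'A' 0 = 0 := by decide
theorem dB_E : solDicB.getD 'E' 0 = 1 := by decide
theorem dB_I : solDicB.getD 'I' 0 = 2 := by decide
theorem dB_O : solDicB.getD 'O' 0 = 3 := by decide
theorem dB_U : solDicB.getD 'U' 0 = 4 := by decide

-- per-position contribution: A's branch+inner-loop equals B's rank*weight+1, for any accumulator
theorem sol_step (c : Char) (hc : c ∈ ['A', 'E', 'I', 'O', 'U']) (i : Int)
    (h0 : 0 ≤ i) (h5 : i < 5) (answer : Int) :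
    (if c = 'A' then answer + 1
     else ((PySem.List.pyRange 4 i (-1)).foldl
            (fun a j => a + (5 : Int) ^ (j - i).toNat * solDicA.getD c 0) answer)
          + solDicA.getD c 0 + 1)
    = answer + solDicB.getD c 0 * PySem.List.pyGetD solWeights i 0 + 1 := by
  interval_cases i <;> fin_cases hc <;>
    simp [PySem.List.pyRange_neg_one, List.range_succ, solWeights,
      PySem.List.pyGetD, PySem.List.pyGet?, PySem.List.pyIdx?,
      dA_E, dA_I, dA_O, dA_U, dB_A, dB_E, dB_I, dB_O, dB_U] <;> ring

theorem solution_spec' (word : String) (h : Pre_solution word) :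
    solution word = solution_alt word := by
  obtain ⟨hlen, hall⟩ := h
  have hmem : ∀ c ∈ word.toList, c ∈ ['A', 'E', 'I', 'O', 'U'] := by
    intro c hc
    exact of_decide_eq_true (List.all_eq_true.mp hall c hc)
  unfold solution solution_alt
  rw [PySem.List.enumerate_eq_map_pyRange (d := ' '), List.foldl_map]
  simp only [PySem.Str.len_eq]
  apply PySem.List.foldl_congr_mem
  intro acc i hi
  rw [PySem.List.mem_pyRange_one] at hi
  obtain ⟨hi0, hiN⟩ := hi
  have hlt : i.toNat < word.toList.length := by omega
  have hget : PySem.List.pyGetD word.toList i ' ' = word.toList[i.toNat] := by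
    simp only [PySem.List.pyGetD]
    rw [PySem.List.pyGet?_of_nonneg _ hi0]
    simp [List.getElem?_eq_getElem hlt]
  have hcv : word.toList[i.toNat] ∈ ['A', 'E', 'I', 'O', 'U'] :=
    hmem _ (List.getElem_mem hlt)
  simpa [hget] using sol_step _ hcv i hi0 (by omega) acc

-- ===== VERDICT (by name: the statement is the Claim_ definition above) =====
theorem solution_spec : Claim_equal_solution := by
  intro word _ h
  exact solution_spec' word h
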